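-- pv_equiv track=rewrite | github.com/thanujamaheepala/computerVision | noiceFiltering.py | getMidPointFilteredArray
-- ===== SOURCE A (Python) =====
-- def getMidPointFilteredArray(imageArray,filterArray):
--     f=len(filterArray)
--     N = len(imageArray)
--     M = len(imageArray[0])
--     result_array = []
--     for x in range(N-(f-1)):
--         result_row = []
--         for y in range(M-(f-1)):
--             resultArray = []
--             for i in range(x,x+f):
--                 for j in range (y,y+f):
--                     resultArray.append(imageArray[i][j])
--             resultArray.sort()
--             mid = len(resultArray) // 2
--             res = (int(resultArray[0]) + int(resultArray[-1]))/ 2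
--             result_row.append(int(res))
--         result_array.append(result_row)
--     return result_array
-- ===== SOURCE B (Python) =====
-- def getMidPointFilteredArray(imageArray, filterArray):
--     # Separable midpoint filter: per-row sliding-window minima/maxima first,
--     # then a vertical pass combines f row-statistics per output pixel.
--     f = len(filterArray)
--     M = len(imageArray[0])
--     W = M - f + 1
--     row_mins = [[min(row[y:y + f]) for y in range(W)] for row in imageArray]
--     row_maxs = [[max(row[y:y + f]) for y in range(W)] for row in imageArray]
--     out = []
--     for x in range(len(imageArray) - f + 1):
--         out_row = []
--         for y in range(W):
--             lo = min(row_mins[i][y] for i in range(x, x + f))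
--             hi = max(row_maxs[i][y] for i in range(x, x + f))
--             s = lo + hi
--             q = abs(s) // 2  # truncating halving, = int(s / 2)
--             out_row.append(q if s >= 0 else -q)
--         out.append(out_row)
--     return out
-- ===== Notes on version B (the rewrite author's own statement) =====
-- stated objective: alternative
-- what changed: Replaces the sort of every f*f window with a separable two-pass min/max filter (per-row sliding-window minima/maxima, then a vertical pass combining f row statistics per pixel), doing the truncating halving in integer arithmetic; asymptotically lighter in the filter size f, though a timing run did not confirm a speed-up on the generated inputs.
-- outside the precondition, e.g. on getMidPointFilteredArray([[1, 2, 3], []], [0, 0, 0]): A returns [], B raises ValueError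
import Mathlib
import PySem

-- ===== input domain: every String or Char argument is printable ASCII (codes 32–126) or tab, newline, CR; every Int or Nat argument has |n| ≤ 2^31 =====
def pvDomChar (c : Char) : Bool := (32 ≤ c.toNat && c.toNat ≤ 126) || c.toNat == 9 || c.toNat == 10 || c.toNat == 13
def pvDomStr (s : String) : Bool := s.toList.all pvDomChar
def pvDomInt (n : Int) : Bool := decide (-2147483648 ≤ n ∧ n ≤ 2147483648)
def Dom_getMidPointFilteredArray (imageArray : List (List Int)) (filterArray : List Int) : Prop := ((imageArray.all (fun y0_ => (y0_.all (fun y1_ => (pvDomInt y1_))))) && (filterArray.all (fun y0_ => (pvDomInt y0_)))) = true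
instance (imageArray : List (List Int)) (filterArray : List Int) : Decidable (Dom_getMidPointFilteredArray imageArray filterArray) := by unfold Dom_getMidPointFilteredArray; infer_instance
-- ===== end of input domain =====

-- B replaces A's per-window sort with a separable two-pass sliding min/max filter: horizontal
-- per-row window minima/maxima first, then a vertical pass combines f row statistics per pixel.

-- ===== PORT A =====
-- A: sorts every f*f window and takes (first + last) / 2 truncated (int(...) of a float division;
-- exact on Dom since |min + max| ≤ 2^32 < 2^53, so it is truncating integer division).
def getMidPointFilteredArray (imageArray : List (List Int)) (filterArray : List Int) : List (List Int) :=
  let f : Int := filterArray.length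
  let N : Int := imageArray.length
  let M : Int := ((imageArray.headD []).length : Int)  -- imageArray[0]; Pre_ gives imageArray ≠ []
  (PySem.List.pyRange 0 (N - (f - 1)) 1).foldl (fun result_array x =>
    result_array ++ [
      (PySem.List.pyRange 0 (M - (f - 1)) 1).foldl (fun result_row y =>
        let resultArray :=
          (PySem.List.pyRange x (x + f) 1).foldl (fun acc i =>
            (PySem.List.pyRange y (y + f) 1).foldl (fun acc2 j =>
              acc2 ++ [PySem.List.pyGetD (PySem.List.pyGetD imageArray i []) j 0]) acc) []
        let sortedArr := PySem.List.sorted resultArray (fun v => v) false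
        -- A's variable 'mid' is computed but never used; omitted
        let res := PySem.Int.truncdiv
          (PySem.List.pyGetD sortedArr 0 0 + PySem.List.pyGetD sortedArr (-1) 0) 2
        result_row ++ [res]) []
    ]) []

-- ===== PORT B =====
-- Python's min/max of a nonempty list (the [] case is unreachable under Pre_).
def pvListMin : List Int → Int
  | [] => 0
  | h :: t => t.foldl min h

def pvListMax : List Int → Int
  | [] => 0
  | h :: t => t.foldl max h

def getMidPointFilteredArray_alt (imageArray : List (List Int)) (filterArray : List Int) : List (List Int) :=
  let f : Int := filterArray.length
  let M : Int := ((imageArray.headD []).length : Int)  -- imageArray[0]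
  let W : Int := M - f + 1
  let rowMins := imageArray.map (fun row =>
    (PySem.List.pyRange 0 W 1).map (fun y => pvListMin (PySem.List.slice row (some y) (some (y + f)))))
  let rowMaxs := imageArray.map (fun row =>
    (PySem.List.pyRange 0 W 1).map (fun y => pvListMax (PySem.List.slice row (some y) (some (y + f)))))
  (PySem.List.pyRange 0 ((imageArray.length : Int) - f + 1) 1).foldl (fun out x =>
    out ++ [
      (PySem.List.pyRange 0 W 1).foldl (fun outRow y =>
        let lo := pvListMin ((PySem.List.pyRange x (x + f) 1).map (fun i =>
          PySem.List.pyGetD (PySem.List.pyGetD rowMins i []) y 0))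
        let hi := pvListMax ((PySem.List.pyRange x (x + f) 1).map (fun i =>
          PySem.List.pyGetD (PySem.List.pyGetD rowMaxs i []) y 0))
        let s := lo + hi
        let q : Int := ((s.natAbs / 2 : Nat) : Int)  -- abs(s) // 2; truncating halving = int(s / 2)
        outRow ++ [if 0 ≤ s then q else -q]) []
    ]) []

-- ===== PRECONDITION & SPEC =====
-- Pre_ excludes: empty imageArray or empty filterArray (A raises IndexError); ragged arrays where
-- some window reads a missing entry, on which A raises IndexError; and the degenerate raggedness
-- of a row no longer than M - f when no vertical window exists, where A returns [] but B raises.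
def Pre_getMidPointFilteredArray (imageArray : List (List Int)) (filterArray : List Int) : Prop :=
  imageArray ≠ [] ∧ filterArray ≠ [] ∧
    (∀ row ∈ imageArray, ((imageArray.headD []).length : Int) - filterArray.length < row.length) ∧
    (((filterArray.length : Int) ≤ imageArray.length ∧
        (filterArray.length : Int) ≤ (imageArray.headD []).length) →
      ∀ row ∈ imageArray, (imageArray.headD []).length ≤ row.length)
instance (imageArray : List (List Int)) (filterArray : List Int) : Decidable (Pre_getMidPointFilteredArray imageArray filterArray) := by unfold Pre_getMidPointFilteredArray; infer_instance

def pvWitness_getMidPointFilteredArray : List (List Int) × List Int :=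
  ([[1, 2, 3], [4, 5, 6], [7, 8, 9]], [0, 0])

def Spec_getMidPointFilteredArray (imageArray : List (List Int)) (filterArray : List Int) (out : List (List Int)) : Prop := out = getMidPointFilteredArray_alt imageArray filterArray
instance (imageArray : List (List Int)) (filterArray : List Int) (out : List (List Int)) : Decidable (Spec_getMidPointFilteredArray imageArray filterArray out) := by unfold Spec_getMidPointFilteredArray; infer_instance

-- ===== CLAIM (what is proved, stated in full; the proofs are below) =====
def Claim_equal_getMidPointFilteredArray : Prop := ∀ (imageArray : List (List Int)) (filterArray : List Int), Dom_getMidPointFilteredArray imageArray filterArray → Pre_getMidPointFilteredArray imageArray filterArray → Spec_getMidPointFilteredArray imageArray filterArray (getMidPointFilteredArray imageArray filterArray)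
-- ===== LEMMAS AND PROOFS =====

-- folds of min/max: peeling the first element, bounds, membership
lemma pvFoldlMin_cons (i : Int) (l : List Int) : ∀ h : Int, List.foldl min h (i :: l) = min h (List.foldl min i l) := by
  induction l generalizing i with
  | nil => intro h; simp [List.foldl]
  | cons a t ih =>
      intro h
      show List.foldl min (min h i) (a :: t) = _
      rw [show List.foldl min (min h i) (a :: t) = List.foldl min (min (min h i) a) t from rfl,
          min_assoc, ← List.foldl_cons, ih (min i a) h]
      rfl
lemma pvFoldlMax_cons (i : Int) (l : List Int) : ∀ h : Int, List.foldl max h (i :: l) = max h (List.foldl max i l) := by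
  induction l generalizing i with
  | nil => intro h; simp [List.foldl]
  | cons a t ih =>
      intro h
      show List.foldl max (max h i) (a :: t) = _
      rw [show List.foldl max (max h i) (a :: t) = List.foldl max (max (max h i) a) t from rfl,
          max_assoc, ← List.foldl_cons, ih (max i a) h]
      rfl
lemma pvFoldlMin_le_self (l : List Int) : ∀ x : Int, List.foldl min x l ≤ x := by
  induction l with
  | nil => intro x; simp
  | cons a t ih =>
      intro x
      calc List.foldl min (min x a) t ≤ min x a := ih _
        _ ≤ x := min_le_left _ _
lemma pvFoldlMax_ge_self (l : List Int) : ∀ x : Int, x ≤ List.foldl max x l := by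
  induction l with
  | nil => intro x; simp
  | cons a t ih =>
      intro x
      calc x ≤ max x a := le_max_left _ _
        _ ≤ List.foldl max (max x a) t := ih _
lemma pvFoldlMin_le (l : List Int) : ∀ (x a : Int), a ∈ l → List.foldl min x l ≤ a := by
  induction l with
  | nil => intro x a ha; simp at ha
  | cons b t ih =>
      intro x a ha
      rcases List.mem_cons.1 ha with rfl | h
      · calc List.foldl min (min x a) t ≤ min x a := pvFoldlMin_le_self t _
          _ ≤ a := min_le_right _ _
      · exact ih (min x b) a h
lemma pvFoldlMax_ge (l : List Int) : ∀ (x a : Int), a ∈ l → a ≤ List.foldl max x l := by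
  induction l with
  | nil => intro x a ha; simp at ha
  | cons b t ih =>
      intro x a ha
      rcases List.mem_cons.1 ha with rfl | h
      · calc a ≤ max x a := le_max_right _ _
          _ ≤ List.foldl max (max x a) t := pvFoldlMax_ge_self t _
      · exact ih (max x b) a h
lemma pvFoldlMin_mem (l : List Int) : ∀ x : Int, List.foldl min x l ∈ x :: l := by
  induction l with
  | nil => intro x; simp
  | cons a t ih =>
      intro x
      have h := ih (min x a)
      rcases min_cases x a with ⟨he, _⟩ | ⟨he, _⟩ <;> rw [he] at h <;>
        · show List.foldl min (min x a) t ∈ _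
          rw [he]
          rcases List.mem_cons.1 h with h2 | h2 <;> simp [h2]
lemma pvFoldlMax_mem (l : List Int) : ∀ x : Int, List.foldl max x l ∈ x :: l := by
  induction l with
  | nil => intro x; simp
  | cons a t ih =>
      intro x
      have h := ih (max x a)
      rcases max_cases x a with ⟨he, _⟩ | ⟨he, _⟩ <;> rw [he] at h <;>
        · show List.foldl max (max x a) t ∈ _
          rw [he]
          rcases List.mem_cons.1 h with h2 | h2 <;> simp [h2]

-- the same facts for Python's min/max of a nonempty list
lemma pvListMin_cons (a : Int) (l : List Int) (h : l ≠ []) : pvListMin (a :: l) = min a (pvListMin l) := by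
  obtain ⟨b, t, rfl⟩ := List.exists_cons_of_ne_nil h
  simpa [pvListMin] using pvFoldlMin_cons b t a
lemma pvListMax_cons (a : Int) (l : List Int) (h : l ≠ []) : pvListMax (a :: l) = max a (pvListMax l) := by
  obtain ⟨b, t, rfl⟩ := List.exists_cons_of_ne_nil h
  simpa [pvListMax] using pvFoldlMax_cons b t a
lemma pvListMin_append (a b : List Int) (ha : a ≠ []) (hb : b ≠ []) :
    pvListMin (a ++ b) = min (pvListMin a) (pvListMin b) := by
  obtain ⟨x, t, rfl⟩ := List.exists_cons_of_ne_nil ha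
  obtain ⟨z, u, rfl⟩ := List.exists_cons_of_ne_nil hb
  show List.foldl min x (t ++ z :: u) = _
  rw [List.foldl_append, pvFoldlMin_cons z u (List.foldl min x t)]
  rfl
lemma pvListMax_append (a b : List Int) (ha : a ≠ []) (hb : b ≠ []) :
    pvListMax (a ++ b) = max (pvListMax a) (pvListMax b) := by
  obtain ⟨x, t, rfl⟩ := List.exists_cons_of_ne_nil ha
  obtain ⟨z, u, rfl⟩ := List.exists_cons_of_ne_nil hb
  show List.foldl max x (t ++ z :: u) = _
  rw [List.foldl_append, pvFoldlMax_cons z u (List.foldl max x t)]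
  rfl
lemma pvListMin_mem (l : List Int) (h : l ≠ []) : pvListMin l ∈ l := by
  obtain ⟨x, t, rfl⟩ := List.exists_cons_of_ne_nil h
  exact pvFoldlMin_mem t x
lemma pvListMax_mem (l : List Int) (h : l ≠ []) : pvListMax l ∈ l := by
  obtain ⟨x, t, rfl⟩ := List.exists_cons_of_ne_nil h
  exact pvFoldlMax_mem t x
lemma pvListMin_le (l : List Int) (a : Int) (ha : a ∈ l) : pvListMin l ≤ a := by
  obtain ⟨x, t, rfl⟩ := List.exists_cons_of_ne_nil (List.ne_nil_of_mem ha)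
  rcases List.mem_cons.1 ha with rfl | h
  · exact pvFoldlMin_le_self t a
  · exact pvFoldlMin_le t x a h
lemma pvListMax_ge (l : List Int) (a : Int) (ha : a ∈ l) : a ≤ pvListMax l := by
  obtain ⟨x, t, rfl⟩ := List.exists_cons_of_ne_nil (List.ne_nil_of_mem ha)
  rcases List.mem_cons.1 ha with rfl | h
  · exact pvFoldlMax_ge_self t a
  · exact pvFoldlMax_ge t x a h

-- in a ≤-pairwise list every element is at most the last one
lemma pvPairwise_le_getLast (l : List Int) (hp : l.Pairwise (· ≤ ·)) :
    ∀ z ∈ l, z ≤ l.getLast?.getD 0 := by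
  induction l with
  | nil => intro z hz; simp at hz
  | cons a t ih =>
      intro z hz
      cases t with
      | nil => simp_all
      | cons b u =>
          rw [List.getLast?_cons_cons]
          rcases List.mem_cons.1 hz with rfl | hz2
          · have hg : (b :: u).getLast? = some ((b :: u).getLast (by simp)) :=
              List.getLast?_eq_some_getLast (by simp)
            rw [hg]
            exact (List.pairwise_cons.1 hp).1 _ (List.mem_of_getLast? hg)
          · exact ih (List.pairwise_cons.1 hp).2 z hz2

-- the sorted window: first element is the min, last element is the max
lemma pvSortedHead (l : List Int) (h : l ≠ []) :
    PySem.List.pyGetD (PySem.List.sorted l (fun v => v) false) 0 0 = pvListMin l := by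
  have hs : PySem.List.sorted l (fun v => v) false ≠ [] := by
    simpa [PySem.List.sorted_eq_nil_iff] using h
  obtain ⟨m, t, he⟩ := List.exists_cons_of_ne_nil hs
  rw [he]
  have hm : m ∈ l := by
    have : m ∈ PySem.List.sorted l (fun v => v) false := by simp [he]
    simpa [PySem.List.mem_sorted] using this
  have h1 : m ≤ pvListMin l := PySem.List.key_head_sorted_le l (fun v => v) he _ (pvListMin_mem l h)
  have h2 : pvListMin l ≤ m := pvListMin_le l m hm
  have h0 : PySem.List.pyGetD (m :: t) 0 0 = m := by
    rw [PySem.List.pyGetD_eq_getElem _ 0 (by omega) (by simp)]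
    simp
  omega
lemma pvSortedLast (l : List Int) (h : l ≠ []) :
    PySem.List.pyGetD (PySem.List.sorted l (fun v => v) false) (-1) 0 = pvListMax l := by
  have hs : PySem.List.sorted l (fun v => v) false ≠ [] := by
    simpa [PySem.List.sorted_eq_nil_iff] using h
  set L := PySem.List.sorted l (fun v => v) false with hL
  have hlen : 1 ≤ L.length := List.length_pos_iff.2 hs
  have hget : PySem.List.pyGetD L (-1) 0 = L.getLast?.getD 0 := by
    simp [PySem.List.pyGetD, PySem.List.pyGet?, PySem.List.pyIdx?, hlen,
          List.getLast?_eq_getElem?]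
  obtain ⟨g, hg⟩ : ∃ g, L.getLast? = some g := by
    cases hLL : L.getLast? with
    | none => rw [List.getLast?_eq_none_iff] at hLL; exact absurd hLL hs
    | some g => exact ⟨g, rfl⟩
  have hgmem : g ∈ l := by
    have : g ∈ L := List.mem_of_getLast? hg
    simpa [hL, PySem.List.mem_sorted] using this
  have hp : L.Pairwise (· ≤ ·) := by
    simpa using PySem.List.sorted_pairwise l (fun v => v)
  have h1 : pvListMax l ≤ g := by
    have hmem : pvListMax l ∈ L := by simpa [hL, PySem.List.mem_sorted] using pvListMax_mem l h
    have := pvPairwise_le_getLast L hp _ hmem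
    rwa [hg] at this
  have h2 : g ≤ pvListMax l := pvListMax_ge l g hgmem
  rw [hget, hg]
  simpa using le_antisymm h2 h1

-- min/max of a concatenation of nonempty blocks = min/max of the blockwise minima/maxima
lemma pvFlatMap_ne_nil (is : List Int) (g : Int → List Int) (h : is ≠ []) (hg : ∀ i ∈ is, g i ≠ []) :
    is.flatMap g ≠ [] := by
  obtain ⟨i, t, rfl⟩ := List.exists_cons_of_ne_nil h
  intro hnil
  rw [List.flatMap_cons, List.append_eq_nil_iff] at hnil
  exact hg i (by simp) hnil.1
lemma pvListMin_flatMap (is : List Int) (g : Int → List Int) (h : is ≠ []) (hg : ∀ i ∈ is, g i ≠ []) :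
    pvListMin (is.flatMap g) = pvListMin (is.map (fun i => pvListMin (g i))) := by
  induction is with
  | nil => exact absurd rfl h
  | cons i t ih =>
      cases t with
      | nil => simp [List.flatMap_cons, pvListMin]
      | cons j u =>
          have ht : (j :: u) ≠ [] := by simp
          have hgt : ∀ k ∈ j :: u, g k ≠ [] := fun k hk => hg k (by simp [hk])
          rw [List.flatMap_cons,
              pvListMin_append _ _ (hg i (by simp)) (pvFlatMap_ne_nil _ g ht hgt),
              List.map_cons, pvListMin_cons _ _ (by simp), ih ht hgt]
lemma pvListMax_flatMap (is : List Int) (g : Int → List Int) (h : is ≠ []) (hg : ∀ i ∈ is, g i ≠ []) :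
    pvListMax (is.flatMap g) = pvListMax (is.map (fun i => pvListMax (g i))) := by
  induction is with
  | nil => exact absurd rfl h
  | cons i t ih =>
      cases t with
      | nil => simp [List.flatMap_cons, pvListMax]
      | cons j u =>
          have ht : (j :: u) ≠ [] := by simp
          have hgt : ∀ k ∈ j :: u, g k ≠ [] := fun k hk => hg k (by simp [hk])
          rw [List.flatMap_cons,
              pvListMax_append _ _ (hg i (by simp)) (pvFlatMap_ne_nil _ g ht hgt),
              List.map_cons, pvListMax_cons _ _ (by simp), ih ht hgt]

-- A's inner index loop over a row equals B's slice
lemma pvMapRange_eq_slice (row : List Int) (y f : Int) (hy : 0 ≤ y) (hf : 0 ≤ f)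
    (hlen : y + f ≤ (row.length : Int)) :
    (PySem.List.pyRange y (y + f) 1).map (fun j => PySem.List.pyGetD row j 0)
      = PySem.List.slice row (some y) (some (y + f)) := by
  rw [PySem.List.slice_toNat row hy (by omega)]
  apply List.ext_getElem
  · simp [PySem.List.length_pyRange_one]
    omega
  · intro k h1 h2
    have hk : k < f.toNat := by
      simpa [PySem.List.length_pyRange_one] using h1
    simp only [List.getElem_map, PySem.List.getElem_pyRange_one]
    rw [PySem.List.pyGetD_eq_getElem row 0 (by omega) (by omega)]
    rw [List.getElem_take, List.getElem_drop]
    congr 1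
    omega

-- truncating division by 2 in terms of abs
lemma pvTruncdiv_two (s : Int) :
    PySem.Int.truncdiv s 2 = if 0 ≤ s then ((s.natAbs / 2 : Nat) : Int) else -((s.natAbs / 2 : Nat) : Int) := by
  rcases s with n | n <;> simp [PySem.Int.truncdiv, Int.tdiv]

-- indexing a mapped list inside bounds
lemma pvGetD_map_in {α β : Type} (F : α → β) (xs : List α) (i : Int) (d : β) (d' : α)
    (h0 : 0 ≤ i) (h : i < (xs.length : Int)) :
    PySem.List.pyGetD (xs.map F) i d = F (PySem.List.pyGetD xs i d') := by
  rw [PySem.List.pyGetD_eq_getElem _ d h0 (by simpa using h),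
      PySem.List.pyGetD_eq_getElem _ d' h0 h, List.getElem_map]

-- ===== VERDICT (by name: the statement is the Claim_ definition above) =====
theorem getMidPointFilteredArray_spec : Claim_equal_getMidPointFilteredArray := by
  intro ia fa hdom hpre
  obtain ⟨hne, hfne, hshort, hrect⟩ := hpre
  unfold Spec_getMidPointFilteredArray getMidPointFilteredArray getMidPointFilteredArray_alt
  simp only [PySem.List.foldl_append_singleton_eq_map, PySem.List.foldl_append_eq_flatMap,
    List.nil_append]
  have hf1 : 1 ≤ (fa.length : Int) := by
    have : 0 < fa.length := List.length_pos_iff.2 hfne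
    omega
  have hN : (ia.length : Int) - ((fa.length : Int) - 1) = (ia.length : Int) - fa.length + 1 := by ring
  have hM : (((ia.headD []).length : Int)) - ((fa.length : Int) - 1)
      = (((ia.headD []).length : Int)) - fa.length + 1 := by ring
  rw [hN, hM]
  apply List.map_congr_left
  intro x hx
  apply List.map_congr_left
  intro y hy
  obtain ⟨hx0, hxlt⟩ := PySem.List.mem_pyRange_one.1 hx
  obtain ⟨hy0, hylt⟩ := PySem.List.mem_pyRange_one.1 hy
  have hjs_ne : PySem.List.pyRange y (y + (fa.length : Int)) ≠ [] := by
    intro hnil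
    have := congrArg List.length hnil
    rw [PySem.List.length_pyRange_one] at this
    simp at this
    exact hfne this
  have his_ne : PySem.List.pyRange x (x + (fa.length : Int)) ≠ [] := by
    intro hnil
    have := congrArg List.length hnil
    rw [PySem.List.length_pyRange_one] at this
    simp at this
    exact hfne this
  have hg_ne : ∀ i ∈ PySem.List.pyRange x (x + (fa.length : Int)),
      (PySem.List.pyRange y (y + (fa.length : Int))).map
        (fun j => PySem.List.pyGetD (PySem.List.pyGetD ia i []) j 0) ≠ [] := by
    intro i _
    simpa using hjs_ne
  have hW_ne := pvFlatMap_ne_nil _ _ his_ne hg_ne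
  rw [pvSortedHead _ hW_ne, pvSortedLast _ hW_ne, pvTruncdiv_two,
      pvListMin_flatMap _ _ his_ne hg_ne, pvListMax_flatMap _ _ his_ne hg_ne]
  have hrows : ∀ row ∈ ia, (ia.headD []).length ≤ row.length := by
    refine hrect ⟨by omega, by omega⟩
  have hrowfact : ∀ i ∈ PySem.List.pyRange x (x + (fa.length : Int)),
      0 ≤ i ∧ i < (ia.length : Int) ∧
        ((ia.headD []).length : Int) ≤ ((PySem.List.pyGetD ia i []).length : Int) := by
    intro i hi
    obtain ⟨hxi, hixf⟩ := PySem.List.mem_pyRange_one.1 hi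
    have hi0 : 0 ≤ i := le_trans hx0 hxi
    have hiN : i < (ia.length : Int) := by omega
    refine ⟨hi0, hiN, ?_⟩
    rw [PySem.List.pyGetD_eq_getElem ia [] hi0 hiN]
    exact_mod_cast hrows _ (List.getElem_mem _)
  have hmap_min :
      (PySem.List.pyRange x (x + (fa.length : Int))).map
        (fun i => pvListMin ((PySem.List.pyRange y (y + (fa.length : Int))).map
          (fun j => PySem.List.pyGetD (PySem.List.pyGetD ia i []) j 0)))
      = (PySem.List.pyRange x (x + (fa.length : Int))).map
        (fun i => PySem.List.pyGetD (PySem.List.pyGetD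
            (ia.map (fun row => (PySem.List.pyRange 0 (((ia.headD []).length : Int) - fa.length + 1)).map
              (fun y => pvListMin (PySem.List.slice row (some y) (some (y + (fa.length : Int)))))))
            i []) y 0) := by
    apply List.map_congr_left
    intro i hi
    obtain ⟨hi0, hiN, hlenr⟩ := hrowfact i hi
    have h1 : PySem.List.pyGetD
        (ia.map (fun row => (PySem.List.pyRange 0 (((ia.headD []).length : Int) - fa.length + 1)).map
          (fun y => pvListMin (PySem.List.slice row (some y) (some (y + (fa.length : Int))))))) i []
        = (PySem.List.pyRange 0 (((ia.headD []).length : Int) - fa.length + 1)).map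
          (fun y => pvListMin (PySem.List.slice (PySem.List.pyGetD ia i []) (some y) (some (y + (fa.length : Int))))) :=
      pvGetD_map_in _ ia i _ [] hi0 hiN
    rw [h1, PySem.List.pyGetD_eq_getElem _ 0 hy0
      (by rw [List.length_map, PySem.List.length_pyRange_one]; omega)]
    rw [List.getElem_map, PySem.List.getElem_pyRange_one]
    have hyy : (0 : Int) + (y.toNat : Int) = y := by omega
    rw [hyy, pvMapRange_eq_slice _ y _ hy0 (by omega) (by omega)]
  have hmap_max :
      (PySem.List.pyRange x (x + (fa.length : Int))).map
        (fun i => pvListMax ((PySem.List.pyRange y (y + (fa.length : Int))).map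
          (fun j => PySem.List.pyGetD (PySem.List.pyGetD ia i []) j 0)))
      = (PySem.List.pyRange x (x + (fa.length : Int))).map
        (fun i => PySem.List.pyGetD (PySem.List.pyGetD
            (ia.map (fun row => (PySem.List.pyRange 0 (((ia.headD []).length : Int) - fa.length + 1)).map
              (fun y => pvListMax (PySem.List.slice row (some y) (some (y + (fa.length : Int)))))))
            i []) y 0) := by
    apply List.map_congr_left
    intro i hi
    obtain ⟨hi0, hiN, hlenr⟩ := hrowfact i hi
    have h1 : PySem.List.pyGetD
        (ia.map (fun row => (PySem.List.pyRange 0 (((ia.headD []).length : Int) - fa.length + 1)).map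
          (fun y => pvListMax (PySem.List.slice row (some y) (some (y + (fa.length : Int))))))) i []
        = (PySem.List.pyRange 0 (((ia.headD []).length : Int) - fa.length + 1)).map
          (fun y => pvListMax (PySem.List.slice (PySem.List.pyGetD ia i []) (some y) (some (y + (fa.length : Int))))) :=
      pvGetD_map_in _ ia i _ [] hi0 hiN
    rw [h1, PySem.List.pyGetD_eq_getElem _ 0 hy0
      (by rw [List.length_map, PySem.List.length_pyRange_one]; omega)]
    rw [List.getElem_map, PySem.List.getElem_pyRange_one]
    have hyy : (0 : Int) + (y.toNat : Int) = y := by omega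
    rw [hyy, pvMapRange_eq_slice _ y _ hy0 (by omega) (by omega)]
  rw [hmap_min, hmap_max]
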